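-- pv_equiv track=rewrite | github.com/inigo-irigaray/NEAT-neuroevolution-pytorch | graphs.py | required_for_outputs
-- ===== SOURCE A (Python) =====
-- def required_for_outputs(inputs, outputs, connections):
--   required = set(outputs)
--   s = set(outputs)
--   while True:
--     t = set(a for (a,b) in connections if b in s and a not in s)
--     if not t:
--       break
--
--     layer_nodes = set(x for x in t if x not in inputs)
--     if not layer_nodes:
--       break
--
--     required = required.union(layer_nodes)
--     s = s.union(t)
--
--   return required
-- ===== SOURCE B (Python) =====
-- def required_for_outputs(inputs, outputs, connections):
--     # reverse index: node -> sorted list of positions of connections ending there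
--     rev = {}
--     for i, (a, b) in enumerate(connections):
--         rev.setdefault(b, []).append(i)
--     inp = set(inputs)
--     required = set(outputs)
--     s = set(outputs)
--     frontier = list(dict.fromkeys(outputs))
--     while frontier:
--         t = []
--         tseen = set()
--         for i in sorted(i for b in frontier for i in rev.get(b, [])):
--             a = connections[i][0]
--             if a not in s and a not in tseen:
--                 t.append(a)
--                 tseen.add(a)
--         if not t:
--             break
--         layer = [x for x in t if x not in inp]
--         if not layer:
--             break
--         required.update(layer)
--         s.update(t)
--         frontier = t
--     return required
-- ===== Notes on version B (the rewrite author's own statement) =====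
-- stated objective: faster
-- what changed: B builds a reverse index (end-node -> connection positions) once and expands only the newest frontier each round via a sorted merge of index lists, instead of A's rescan of every connection against the whole reached set on every round.
import Mathlib
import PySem

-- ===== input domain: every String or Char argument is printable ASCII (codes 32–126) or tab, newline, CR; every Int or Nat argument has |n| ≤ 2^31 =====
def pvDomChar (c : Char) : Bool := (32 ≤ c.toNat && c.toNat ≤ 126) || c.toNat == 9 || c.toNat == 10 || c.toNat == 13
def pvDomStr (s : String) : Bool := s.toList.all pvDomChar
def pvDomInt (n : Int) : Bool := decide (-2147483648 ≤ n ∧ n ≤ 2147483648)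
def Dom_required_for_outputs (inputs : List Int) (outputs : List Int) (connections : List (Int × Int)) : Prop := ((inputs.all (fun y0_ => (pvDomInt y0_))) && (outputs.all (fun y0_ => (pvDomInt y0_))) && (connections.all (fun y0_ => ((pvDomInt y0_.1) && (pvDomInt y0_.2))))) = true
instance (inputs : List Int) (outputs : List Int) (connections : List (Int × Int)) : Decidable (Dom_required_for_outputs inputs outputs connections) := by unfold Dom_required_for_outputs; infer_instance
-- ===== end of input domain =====

-- B builds a reverse index (end node -> connection positions) once and expands only the newest
-- frontier each round, instead of A's rescan of every connection against the whole reached set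
-- every round (objective: faster).  Both Pythons return a set; the ports return its PySem.Set
-- element list and the lists are proved equal.

-- ===== PORT A =====
-- t = set(a for (a,b) in connections if b in s and a not in s)
def tSet (s : List Int) (connections : List (Int × Int)) : List Int :=
  connections.foldl
    (fun t p => if PySem.Set.contains s p.2 && !PySem.Set.contains s p.1
                then PySem.Set.add t p.1 else t) PySem.Set.empty

-- layer_nodes = set(x for x in t if x not in inputs)
def layerSet (inputs t : List Int) : List Int :=
  t.foldl (fun l x => if inputs.contains x then l else PySem.Set.add l x) PySem.Set.empty

-- the 'while True' loop; fuel = connections.length + 1 bounds the number of rounds (each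
-- continuing round adds at least one first component of connections to s)
def goA (inputs : List Int) (connections : List (Int × Int)) : Nat → List Int → List Int → List Int
  | 0, required, _ => required
  | fuel+1, required, s =>
    let t := tSet s connections
    if t = [] then required
    else
      let layer := layerSet inputs t
      if layer = [] then required
      else goA inputs connections fuel (PySem.Set.union required layer) (PySem.Set.union s t)

def required_for_outputs (inputs : List Int) (outputs : List Int) (connections : List (Int × Int)) : List Int :=
  goA inputs connections (connections.length + 1) (PySem.Set.ofList outputs) (PySem.Set.ofList outputs)

-- ===== PORT B =====
-- rev = {}; for i,(a,b) in enumerate(connections): rev.setdefault(b, []).append(i)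
def buildRev (connections : List (Int × Int)) : PySem.Dict Int (List Int) :=
  (PySem.List.enumerate connections).foldl
    (fun d p => PySem.Dict.modify d p.2.2 [] (fun l => l ++ [p.1])) PySem.Dict.empty

-- the for-loop building t (list + mirror set) from the sorted index list
def tList (s : List Int) (connections : List (Int × Int)) (idxs : List Int) : List Int :=
  idxs.foldl
    (fun t i => if PySem.Set.contains s ((PySem.List.pyGetD connections i (0, 0)).1) then t
                else PySem.Set.add t ((PySem.List.pyGetD connections i (0, 0)).1)) PySem.Set.empty

-- the 'while frontier' loop of Source B, same fuel bound as A's loop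
def goB (inp : List Int) (connections : List (Int × Int)) (rev : PySem.Dict Int (List Int)) :
    Nat → List Int → List Int → List Int → List Int
  | 0, required, _, _ => required
  | fuel+1, required, s, frontier =>
    if frontier = [] then required
    else
      let idxs := PySem.List.sorted (frontier.flatMap (fun b => PySem.Dict.getD rev b [])) (fun i => i)
      let t := tList s connections idxs
      if t = [] then required
      else
        let layer := t.filter (fun x => !PySem.Set.contains inp x)
        if layer = [] then required
        else goB inp connections rev fuel (PySem.Set.update required layer) (PySem.Set.update s t) t

def required_for_outputs_alt (inputs : List Int) (outputs : List Int) (connections : List (Int × Int)) : List Int :=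
  goB (PySem.Set.ofList inputs) connections (buildRev connections) (connections.length + 1)
    (PySem.Set.ofList outputs) (PySem.Set.ofList outputs) (PySem.List.dedup outputs)

-- ===== PRECONDITION & SPEC =====
def Spec_required_for_outputs (inputs : List Int) (outputs : List Int) (connections : List (Int × Int)) (out : List Int) : Prop := out = required_for_outputs_alt inputs outputs connections
instance (inputs : List Int) (outputs : List Int) (connections : List (Int × Int)) (out : List Int) : Decidable (Spec_required_for_outputs inputs outputs connections out) := by unfold Spec_required_for_outputs; infer_instance

-- ===== CLAIM (what is proved, stated in full; the proofs are below) =====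
def Claim_equal_required_for_outputs : Prop := ∀ (inputs : List Int) (outputs : List Int) (connections : List (Int × Int)), Dom_required_for_outputs inputs outputs connections → Spec_required_for_outputs inputs outputs connections (required_for_outputs inputs outputs connections)

-- ===== LEMMAS AND PROOFS =====

theorem pairwise_lt_pyRange (n : Nat) :
    (PySem.List.pyRange 0 (n : Int)).Pairwise (· < ·) := by
  rw [PySem.List.pyRange_zero_natCast]
  exact List.pairwise_lt_range.map _ (fun a b h => by exact_mod_cast h)

theorem nodup_pyRange (n : Nat) : (PySem.List.pyRange 0 (n : Int)).Nodup :=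
  (pairwise_lt_pyRange n).imp (fun h => by omega)


theorem containsT {s : List Int} {x : Int} (h : x ∈ s) : PySem.Set.contains s x = true :=
  (PySem.Set.contains_iff _ _).2 h

theorem containsF {s : List Int} {x : Int} (h : x ∉ s) : PySem.Set.contains s x = false := by
  cases hc : PySem.Set.contains s x with
  | false => rfl
  | true => exact absurd ((PySem.Set.contains_iff _ _).1 hc) h

-- rev[b] is the (increasing) list of positions of connections ending in b
theorem revGetD (conn : List (Int × Int)) (b : Int) :
    PySem.Dict.getD (buildRev conn) b [] =
      (PySem.List.pyRange 0 (PySem.List.len conn)).filter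
        (fun i => (PySem.List.pyGetD conn i (0, 0)).2 == b) := by
  unfold buildRev
  rw [PySem.List.enumerate_eq_map_pyRange conn (0, 0), List.foldl_map]
  rw [show (fun (d : PySem.Dict Int (List Int)) (j : Int) =>
        PySem.Dict.modify d ((j, PySem.List.pyGetD conn j (0, 0)).2.2) []
          (fun l => l ++ [(j, PySem.List.pyGetD conn j (0, 0)).1]))
      = (fun (d : PySem.Dict Int (List Int)) (j : Int) =>
          PySem.Dict.modify d (((PySem.List.pyGetD conn j (0, 0)).2, j) : Int × Int).1 []
            (fun l => l ++ [(((PySem.List.pyGetD conn j (0, 0)).2, j) : Int × Int).2])) from rfl]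
  have h1 : (PySem.List.pyRange 0 (PySem.List.len conn)).foldl
      (fun (d : PySem.Dict Int (List Int)) (j : Int) =>
        PySem.Dict.modify d (((PySem.List.pyGetD conn j (0, 0)).2, j) : Int × Int).1 []
          (fun l => l ++ [(((PySem.List.pyGetD conn j (0, 0)).2, j) : Int × Int).2]))
      PySem.Dict.empty
    = ((PySem.List.pyRange 0 (PySem.List.len conn)).map
        (fun j => (((PySem.List.pyGetD conn j (0, 0)).2, j) : Int × Int))).foldl
      (fun (d : PySem.Dict Int (List Int)) q =>
        PySem.Dict.modify d q.1 [] (fun l => l ++ [q.2])) PySem.Dict.empty := by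
    rw [List.foldl_map]
  rw [h1, PySem.Dict.getD_foldl_modify_append]
  simp [List.filter_map, List.map_map, Function.comp_def]

theorem mem_revGetD (conn : List (Int × Int)) (b i : Int) :
    i ∈ PySem.Dict.getD (buildRev conn) b [] ↔
      (0 ≤ i ∧ i < PySem.List.len conn) ∧ (PySem.List.pyGetD conn i (0, 0)).2 = b := by
  rw [revGetD, List.mem_filter, PySem.List.mem_pyRange_one, beq_iff_eq]

theorem nodup_revGetD (conn : List (Int × Int)) (b : Int) :
    (PySem.Dict.getD (buildRev conn) b []).Nodup := by
  rw [revGetD]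
  have : PySem.List.len conn = ((conn.length : Nat) : Int) := by simp [PySem.List.len]
  rw [this]
  exact (nodup_pyRange conn.length).filter _

theorem nodup_flat (conn : List (Int × Int)) (frontier : List Int) (h : frontier.Nodup) :
    (frontier.flatMap (fun b => PySem.Dict.getD (buildRev conn) b [])).Nodup := by
  induction frontier with
  | nil => simp
  | cons b fr ih =>
    simp only [List.flatMap_cons]
    refine List.Nodup.append (nodup_revGetD conn b) (ih h.of_cons) ?_
    intro i hib hifr
    rcases List.mem_flatMap.1 hifr with ⟨b', hb', hib'⟩
    have h1 := ((mem_revGetD conn b i).1 hib).2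
    have h2 := ((mem_revGetD conn b' i).1 hib').2
    have hbb : b = b' := h1.symm.trans h2
    exact (List.nodup_cons.1 h).1 (hbb ▸ hb')

theorem idxs_eq (conn : List (Int × Int)) (frontier : List Int) (h : frontier.Nodup) :
    PySem.List.sorted (frontier.flatMap (fun b => PySem.Dict.getD (buildRev conn) b [])) (fun i => i) =
      (PySem.List.pyRange 0 (PySem.List.len conn)).filter
        (fun i => decide ((PySem.List.pyGetD conn i (0, 0)).2 ∈ frontier)) := by
  apply PySem.List.sorted_eq_of_perm_of_pairwise_lt
  · rw [List.perm_ext_iff_of_nodup]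
    · intro i
      constructor
      · intro hfi
        rcases (List.mem_filter.1 hfi) with ⟨hri, hdi⟩
        rcases PySem.List.mem_pyRange_one.1 hri with ⟨h0, h1⟩
        exact List.mem_flatMap.2 ⟨(PySem.List.pyGetD conn i (0, 0)).2, of_decide_eq_true hdi,
          (mem_revGetD conn _ i).2 ⟨⟨h0, h1⟩, rfl⟩⟩
      · intro hfl
        rcases List.mem_flatMap.1 hfl with ⟨b, hb, hib⟩
        rcases (mem_revGetD conn b i).1 hib with ⟨⟨h0, h1⟩, hm⟩
        exact List.mem_filter.2 ⟨PySem.List.mem_pyRange_one.2 ⟨h0, h1⟩,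
          decide_eq_true (hm ▸ hb)⟩
    · refine ?_
      have : PySem.List.len conn = ((conn.length : Nat) : Int) := by simp [PySem.List.len]
      rw [this]; exact (nodup_pyRange conn.length).filter _
    · exact nodup_flat conn frontier h
  · have : PySem.List.len conn = ((conn.length : Nat) : Int) := by simp [PySem.List.len]
    rw [this]
    exact (pairwise_lt_pyRange conn.length).filter _

-- the element read at an index of the range is a member of connections
theorem pyGetD_mem (conn : List (Int × Int)) (i : Int) (h0 : 0 ≤ i) (h1 : i < PySem.List.len conn) :
    PySem.List.pyGetD conn i (0, 0) ∈ conn := by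
  have hl : i < (conn.length : Int) := by simpa [PySem.List.len] using h1
  rw [PySem.List.pyGetD_eq_getElem conn (0, 0) h0 hl]
  exact List.getElem_mem _

-- the per-round t of A equals the per-round t of B
theorem tEq (conn : List (Int × Int)) (s frontier : List Int)
    (hfs : ∀ x ∈ frontier, x ∈ s)
    (hcl : ∀ p ∈ conn, p.2 ∈ s → p.2 ∉ frontier → p.1 ∈ s)
    (hnd : frontier.Nodup) :
    tSet s conn =
      tList s conn (PySem.List.sorted
        (frontier.flatMap (fun b => PySem.Dict.getD (buildRev conn) b [])) (fun i => i)) := by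
  unfold tSet tList
  rw [idxs_eq conn frontier hnd, List.foldl_filter]
  conv_lhs => rw [show conn = (PySem.List.pyRange 0 (PySem.List.len conn)).map
      (fun j => PySem.List.pyGetD conn j (0, 0)) from (PySem.List.map_pyGetD_pyRange_zero conn (0, 0)).symm]
  rw [List.foldl_map]
  apply PySem.List.foldl_congr_mem
  intro acc i hi
  have hr := PySem.List.mem_pyRange_one.1 hi
  have hpm := pyGetD_mem conn i hr.1 hr.2
  set p := PySem.List.pyGetD conn i (0, 0) with hp
  by_cases hb : p.2 ∈ frontier
  · have hs2 : p.2 ∈ s := hfs _ hb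
    by_cases hs1 : p.1 ∈ s
    · simp [hb, hs1, hs2]
    · simp [hb, hs1, hs2]
  · by_cases hs2 : p.2 ∈ s
    · have hs1 : p.1 ∈ s := hcl p hpm hs2 hb
      rw [containsT hs1]
      simp [hb]
    · rw [containsF hs2]
      simp [hb]

theorem tSet_nodup (s : List Int) (conn : List (Int × Int)) : (tSet s conn).Nodup := by
  unfold tSet
  suffices h : ∀ (l : List (Int × Int)) (acc : List Int), acc.Nodup →
      (l.foldl (fun t p => if PySem.Set.contains s p.2 && !PySem.Set.contains s p.1
        then PySem.Set.add t p.1 else t) acc).Nodup by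
    exact h conn [] List.nodup_nil
  intro l
  induction l with
  | nil => intro acc h; exact h
  | cons q l ih =>
    intro acc h
    simp only [List.foldl_cons]
    split
    · exact ih _ (PySem.Set.nodup_add acc q.1 h)
    · exact ih _ h

theorem tFold_mono (s : List Int) (l : List (Int × Int)) :
    ∀ (acc : List Int) (x : Int), x ∈ acc →
      x ∈ l.foldl (fun t q => if PySem.Set.contains s q.2 && !PySem.Set.contains s q.1
        then PySem.Set.add t q.1 else t) acc := by
  induction l with
  | nil => intro acc x h; exact h
  | cons q l ih =>
    intro acc x h
    simp only [List.foldl_cons]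
    split
    · exact ih _ _ ((PySem.Set.mem_add acc q.1 x).2 (Or.inl h))
    · exact ih _ _ h

theorem tSet_complete (s : List Int) (conn : List (Int × Int)) (p : Int × Int)
    (hp : p ∈ conn) (h2 : p.2 ∈ s) (h1 : p.1 ∉ s) : p.1 ∈ tSet s conn := by
  obtain ⟨l1, l2, rfl⟩ := List.append_of_mem hp
  unfold tSet
  rw [List.foldl_append, List.foldl_cons]
  rw [containsT h2, containsF h1]
  simp only [Bool.not_false, Bool.and_self, if_true]
  exact tFold_mono s l2 _ _ ((PySem.Set.mem_add _ p.1 p.1).2 (Or.inr rfl))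

theorem layer_eq (inputs : List Int) (t : List Int) (h : t.Nodup) :
    layerSet inputs t = t.filter (fun x => !PySem.Set.contains (PySem.Set.ofList inputs) x) := by
  unfold layerSet
  suffices hgen : ∀ (t acc : List Int), (acc ++ t).Nodup →
      t.foldl (fun l x => if inputs.contains x then l else PySem.Set.add l x) acc
        = acc ++ t.filter (fun x => !PySem.Set.contains (PySem.Set.ofList inputs) x) by
    simpa using hgen t [] (by simpa using h)
  intro t
  induction t with
  | nil => intro acc _; simp
  | cons x t ih =>
    intro acc hnd
    simp only [List.foldl_cons, List.filter_cons]
    have hco : PySem.Set.contains (PySem.Set.ofList inputs) x = inputs.contains x := by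
      by_cases hx : x ∈ inputs
      · rw [containsT ((PySem.Set.mem_ofList inputs x).2 hx)]
        simpa using hx
      · rw [containsF (fun hc => hx ((PySem.Set.mem_ofList inputs x).1 hc))]
        symm; simpa using hx
    by_cases hx : x ∈ inputs
    · have hxc : inputs.contains x = true := by simpa using hx
      rw [if_pos hxc]
      have hnd' : (acc ++ t).Nodup := by
        have hsub : (acc ++ t).Sublist (acc ++ x :: t) :=
          List.Sublist.append (List.Sublist.refl acc) (List.sublist_cons_self x t)
        exact List.Nodup.sublist hsub hnd
      rw [ih acc hnd']
      rw [hco, hxc]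
      simp
    · have hxc : inputs.contains x = false := by simpa using hx
      rw [if_neg (by simpa using hx)]
      have hxacc : x ∉ acc := by
        intro hmem
        rw [List.nodup_append] at hnd
        exact hnd.2.2 x hmem x (by simp) rfl
      rw [PySem.Set.add_of_not_mem hxacc]
      have hnd' : ((acc ++ [x]) ++ t).Nodup := by
        simpa [List.append_assoc] using hnd
      rw [ih (acc ++ [x]) hnd']
      rw [hco, hxc]
      simp

theorem goEq (inputs : List Int) (conn : List (Int × Int)) :
    ∀ (fuel : Nat) (required s frontier : List Int),
      s.Nodup → frontier.Nodup → (∀ x ∈ frontier, x ∈ s) →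
      (∀ p ∈ conn, p.2 ∈ s → p.2 ∉ frontier → p.1 ∈ s) →
      goA inputs conn fuel required s
        = goB (PySem.Set.ofList inputs) conn (buildRev conn) fuel required s frontier := by
  intro fuel
  induction fuel with
  | zero => intro required s frontier _ _ _ _; rfl
  | succ fuel ih =>
    intro required s frontier hs hf hfs hcl
    have ht := tEq conn s frontier hfs hcl hf
    by_cases hfe : frontier = []
    · subst hfe
      have htnil : tSet s conn = [] := by
        rw [ht]
        simp only [List.flatMap_nil]
        rfl
      simp [goA, goB, htnil]
    · rw [show goB (PySem.Set.ofList inputs) conn (buildRev conn) (fuel+1) required s frontier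
          = (if frontier = [] then required else
              let idxs := PySem.List.sorted (frontier.flatMap (fun b => PySem.Dict.getD (buildRev conn) b [])) (fun i => i)
              let t := tList s conn idxs
              if t = [] then required
              else
                let layer := t.filter (fun x => !PySem.Set.contains (PySem.Set.ofList inputs) x)
                if layer = [] then required
                else goB (PySem.Set.ofList inputs) conn (buildRev conn) fuel
                  (PySem.Set.update required layer) (PySem.Set.update s t) t) from rfl]
      rw [if_neg hfe]
      rw [show goA inputs conn (fuel+1) required s
          = (let t := tSet s conn
             if t = [] then required
             else
               let layer := layerSet inputs t
               if layer = [] then required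
               else goA inputs conn fuel (PySem.Set.union required layer) (PySem.Set.union s t)) from rfl]
      simp only [← ht]
      by_cases hte : tSet s conn = []
      · rw [if_pos hte, if_pos hte]
      · rw [if_neg hte, if_neg hte]
        have hlay := layer_eq inputs (tSet s conn) (tSet_nodup s conn)
        rw [hlay]
        by_cases hle : (tSet s conn).filter (fun x => !PySem.Set.contains (PySem.Set.ofList inputs) x) = []
        · rw [if_pos hle, if_pos hle]
        · rw [if_neg hle, if_neg hle]
          apply ih
          · exact PySem.Set.nodup_union s (tSet s conn) hs
          · exact tSet_nodup s conn
          · intro x hx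
            exact (PySem.Set.mem_union s (tSet s conn) x).2 (Or.inr hx)
          · intro p hp h2 h2t
            rcases (PySem.Set.mem_union s (tSet s conn) p.2).1 h2 with h2s | h2tt
            · by_cases h1 : p.1 ∈ s
              · exact (PySem.Set.mem_union s (tSet s conn) p.1).2 (Or.inl h1)
              · exact (PySem.Set.mem_union s (tSet s conn) p.1).2
                  (Or.inr (tSet_complete s conn p hp h2s h1))
            · exact absurd h2tt h2t

-- ===== VERDICT (by name: the statement is the Claim_ definition above) =====
theorem required_for_outputs_spec : Claim_equal_required_for_outputs := by
  intro inputs outputs connections _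
  unfold Spec_required_for_outputs required_for_outputs required_for_outputs_alt
  rw [PySem.List.dedup_eq_ofList]
  apply goEq
  · exact PySem.Set.nodup_ofList outputs
  · exact PySem.Set.nodup_ofList outputs
  · intro x hx; exact hx
  · intro p _ h2 h2f; exact absurd h2 h2f
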